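-- pv_equiv track=rewrite | github.com/lhk6397/Movement-Algorithm-Study | Kimyeojung/[PGS] 문자열 내림차순으로 배치하기.py | solution
-- ===== SOURCE A (Python) =====
-- def solution(s):
--     answer = []
--
--     li=list(s)
--     big=[]
--     small=[]
--
--     for i in range(len(li)):
--         if 'a'<=str(li[i])<='z':
--             small.append(str(li[i]))
--         elif 'A'<=str(li[i])<='Z':
--             big.append(str(li[i]))
--
--     big.sort(reverse=True)
--     small.sort(reverse=True)
--
--     answer=list(small)+list(big)
--     answer1=''.join(answer)
--
--     return answer1
-- ===== SOURCE B (Python) =====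
-- def solution(s):
--     # Counting sort over the fixed 52-letter alphabet: one pass to count,
--     # then emit each letter code in descending order, lowercase block first.
--     counts = {}
--     for ch in s:
--         counts[ch] = counts.get(ch, 0) + 1
--     out = []
--     for ch in 'zyxwvutsrqponmlkjihgfedcba' 'ZYXWVUTSRQPONMLKJIHGFEDCBA':
--         out.append(ch * counts.get(ch, 0))
--     return ''.join(out)
-- ===== Notes on version B (the rewrite author's own statement) =====
-- stated objective: faster
-- what changed: Replaces the two comparison sorts of the filtered lowercase/uppercase lists by a single counting pass into a dict followed by emitting the fixed 52-letter alphabet in descending order, repeating each letter by its count.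
import Mathlib
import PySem

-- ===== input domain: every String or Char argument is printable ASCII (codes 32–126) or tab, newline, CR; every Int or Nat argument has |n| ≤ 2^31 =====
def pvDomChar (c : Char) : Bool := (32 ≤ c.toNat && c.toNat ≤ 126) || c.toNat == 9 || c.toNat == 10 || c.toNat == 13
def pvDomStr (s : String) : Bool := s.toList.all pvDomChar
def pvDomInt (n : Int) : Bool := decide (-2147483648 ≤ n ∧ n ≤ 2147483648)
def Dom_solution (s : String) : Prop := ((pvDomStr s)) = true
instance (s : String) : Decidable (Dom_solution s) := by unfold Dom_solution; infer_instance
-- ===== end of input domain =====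

-- B replaces A's two comparison sorts by a counting sort over the fixed 52-letter alphabet
-- (one counting pass, then emit letters in descending order): objective 'faster' (asymptotic).

-- ===== PORT A =====
-- 'a' <= ch <= 'z' on a one-character Python string = code-point comparison = Char ≤
def isLow (c : Char) : Bool := decide ('a' ≤ c) && decide (c ≤ 'z')
def isUp (c : Char) : Bool := decide ('A' ≤ c) && decide (c ≤ 'Z')

def solution (s : String) : String :=
  let li := s.toList
  -- for i in range(len(li)): append li[i] to small / big (index always in range)
  let bs := li.foldl (fun (p : List Char × List Char) c =>
      if isLow c then (p.1, p.2 ++ [c])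
      else if isUp c then (p.1 ++ [c], p.2)
      else p) ([], [])
  -- big.sort(reverse=True); small.sort(reverse=True)
  let big := PySem.List.sorted bs.1 (fun x => x) true
  let small := PySem.List.sorted bs.2 (fun x => x) true
  -- ''.join(small + big)
  String.mk (small ++ big)

-- ===== PORT B =====
def descAlphabet : List Char :=
  ['z', 'y', 'x', 'w', 'v', 'u', 't', 's', 'r', 'q', 'p', 'o', 'n', 'm', 'l', 'k', 'j', 'i', 'h', 'g', 'f', 'e', 'd', 'c', 'b', 'a', 'Z', 'Y', 'X', 'W', 'V', 'U', 'T', 'S', 'R', 'Q', 'P', 'O', 'N', 'M', 'L', 'K', 'J', 'I', 'H', 'G', 'F', 'E', 'D', 'C', 'B', 'A']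

def solution_alt (s : String) : String :=
  -- counts[ch] = counts.get(ch, 0) + 1  is  Dict.modify ch 0 (+1)
  let counts := s.toList.foldl (fun d ch => d.modify ch 0 (fun x => x + 1))
      (PySem.Dict.empty : PySem.Dict Char Int)
  -- ch * counts.get(ch, 0)  (count ≥ 0)  is  List.replicate …; ''.join(out) is the flattening
  String.mk (descAlphabet.flatMap (fun ch => List.replicate (counts.getD ch 0).toNat ch))

-- ===== PRECONDITION & SPEC =====
def Spec_solution (s : String) (out : String) : Prop := out = solution_alt s
instance (s : String) (out : String) : Decidable (Spec_solution s out) := by unfold Spec_solution; infer_instance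

-- ===== CLAIM (what is proved, stated in full; the proofs are below) =====
def Claim_equal_solution : Prop := ∀ (s : String), Dom_solution s → Spec_solution s (solution s)

-- ===== LEMMAS AND PROOFS =====

def lowDesc : List Char := ['z', 'y', 'x', 'w', 'v', 'u', 't', 's', 'r', 'q', 'p', 'o', 'n', 'm', 'l', 'k', 'j', 'i', 'h', 'g', 'f', 'e', 'd', 'c', 'b', 'a']
def upDesc : List Char := ['Z', 'Y', 'X', 'W', 'V', 'U', 'T', 'S', 'R', 'Q', 'P', 'O', 'N', 'M', 'L', 'K', 'J', 'I', 'H', 'G', 'F', 'E', 'D', 'C', 'B', 'A']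

-- the canonical descending arrangement: each alphabet letter repeated by its multiplicity in xs
def canon (alpha xs : List Char) : List Char :=
  alpha.flatMap (fun c => List.replicate (xs.count c) c)

lemma isLow_toNat (c : Char) : isLow c = true ↔ 97 ≤ c.toNat ∧ c.toNat ≤ 122 := by
  simp [isLow, Char.le_def, UInt32.le_iff_toNat_le]

lemma isUp_toNat (c : Char) : isUp c = true ↔ 65 ≤ c.toNat ∧ c.toNat ≤ 90 := by
  simp [isUp, Char.le_def, UInt32.le_iff_toNat_le]

lemma not_up_of_low (c : Char) (h : isLow c = true) : isUp c = false := by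
  rw [isLow_toNat] at h
  by_contra hb
  rw [Bool.not_eq_false, isUp_toNat] at hb
  omega

lemma foldl_split (l : List Char) (a b : List Char) :
    l.foldl (fun (p : List Char × List Char) c =>
      if isLow c then (p.1, p.2 ++ [c])
      else if isUp c then (p.1 ++ [c], p.2)
      else p) (a, b) = (a ++ l.filter isUp, b ++ l.filter isLow) := by
  induction l generalizing a b with
  | nil => simp
  | cons c t ih =>
    by_cases hl : isLow c = true
    · simp [List.foldl_cons, hl, not_up_of_low c hl, ih]
    · by_cases hu : isUp c = true
      · simp [List.foldl_cons, hl, hu, ih]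
      · simp [List.foldl_cons, hl, hu, ih]

lemma count_canon (alpha xs : List Char) (hn : alpha.Nodup) (a : Char) :
    (canon alpha xs).count a = if a ∈ alpha then xs.count a else 0 := by
  induction alpha with
  | nil => simp [canon]
  | cons c t ih =>
    simp only [canon, List.flatMap_cons, List.count_append, List.count_replicate]
    rw [List.nodup_cons] at hn
    have := ih hn.2
    simp only [canon] at this
    rw [this]
    by_cases hac : c = a
    · subst hac
      simp [hn.1]
    · simp [List.mem_cons, Ne.symm hac, hac]

lemma mem_canon (alpha xs : List Char) (a : Char) (h : a ∈ canon alpha xs) : a ∈ alpha := by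
  simp only [canon, List.mem_flatMap, List.mem_replicate] at h
  obtain ⟨c, hc, _, rfl⟩ := h
  exact hc

lemma perm_canon (alpha xs : List Char) (hn : alpha.Nodup) (hcov : ∀ x ∈ xs, x ∈ alpha) :
    (canon alpha xs).Perm xs := by
  rw [List.perm_iff_count]
  intro a
  rw [count_canon alpha xs hn a]
  by_cases ha : a ∈ alpha
  · simp [ha]
  · simp only [ha, if_false]
    symm
    rw [List.count_eq_zero]
    exact fun hax => ha (hcov a hax)

lemma pairwise_canon (alpha xs : List Char) (hp : alpha.Pairwise (fun a b => b < a)) :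
    (canon alpha xs).Pairwise (fun a b => b ≤ a) := by
  induction alpha with
  | nil => simp [canon]
  | cons c t ih =>
    rw [List.pairwise_cons] at hp
    simp only [canon, List.flatMap_cons]
    rw [List.pairwise_append]
    refine ⟨?_, ih hp.2, ?_⟩
    · rw [List.pairwise_replicate]
      right; exact le_refl c
    · intro x hx y hy
      rw [List.eq_of_mem_replicate hx]
      exact le_of_lt (hp.1 y (mem_canon t xs y hy))

lemma sorted_rev_canon (alpha xs : List Char) (hn : alpha.Nodup)
    (hp : alpha.Pairwise (fun a b => b < a)) (hcov : ∀ x ∈ xs, x ∈ alpha) :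
    PySem.List.sorted xs (fun x => x) true = canon alpha xs := by
  apply List.Perm.eq_of_pairwise (le := fun a b : Char => b ≤ a)
  · intro a b _ _ h1 h2
    exact le_antisymm h2 h1
  · exact PySem.List.sorted_pairwise_rev xs (fun x => x)
  · exact pairwise_canon alpha xs hp
  · exact (PySem.List.sorted_perm xs (fun x => x) true).trans (perm_canon alpha xs hn hcov).symm

lemma canon_filter (alpha : List Char) (p : Char → Bool) (li : List Char)
    (hall : ∀ c ∈ alpha, p c = true) :
    canon alpha (li.filter p) = alpha.flatMap (fun c => List.replicate (li.count c) c) := by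
  induction alpha with
  | nil => simp [canon]
  | cons c t ih =>
    simp only [canon, List.flatMap_cons] at *
    rw [List.count_filter (hall c (by simp)), ih (fun d hd => hall d (by simp [hd]))]

lemma counts_getD (li : List Char) (c : Char) :
    ((li.foldl (fun d ch => d.modify ch 0 (fun x => x + 1))
        (PySem.Dict.empty : PySem.Dict Char Int)).getD c 0).toNat = li.count c := by
  have h := PySem.Dict.getD_counter li c
  simp only [PySem.Dict.counter] at h
  rw [h, Int.toNat_natCast]

set_option maxRecDepth 8192 in
lemma lowDesc_mem (c : Char) : c ∈ lowDesc ↔ isLow c = true := by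
  constructor
  · intro h
    have hall : lowDesc.all isLow = true := by decide
    exact List.all_eq_true.mp hall c h
  · intro h
    rw [isLow_toNat] at h
    have hmem : c.toNat ∈ List.range' 97 26 := by
      rw [List.mem_range']
      exact ⟨c.toNat - 97, by omega, by omega⟩
    have hall : (List.range' 97 26).all (fun n => decide (Char.ofNat n ∈ lowDesc)) = true := by
      decide
    have := of_decide_eq_true (List.all_eq_true.mp hall c.toNat hmem)
    rwa [Char.ofNat_toNat] at this
  
set_option maxRecDepth 8192 in
lemma upDesc_mem (c : Char) : c ∈ upDesc ↔ isUp c = true := by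
  constructor
  · intro h
    have hall : upDesc.all isUp = true := by decide
    exact List.all_eq_true.mp hall c h
  · intro h
    rw [isUp_toNat] at h
    have hmem : c.toNat ∈ List.range' 65 26 := by
      rw [List.mem_range']
      exact ⟨c.toNat - 65, by omega, by omega⟩
    have hall : (List.range' 65 26).all (fun n => decide (Char.ofNat n ∈ upDesc)) = true := by
      decide
    have := of_decide_eq_true (List.all_eq_true.mp hall c.toNat hmem)
    rwa [Char.ofNat_toNat] at this

lemma sorted_filter_eq (alpha : List Char) (p : Char → Bool) (li : List Char)
    (hn : alpha.Nodup) (hp : alpha.Pairwise (fun a b => b < a))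
    (hiff : ∀ c, c ∈ alpha ↔ p c = true) :
    PySem.List.sorted (li.filter p) (fun x => x) true
      = alpha.flatMap (fun c => List.replicate (li.count c) c) := by
  rw [sorted_rev_canon alpha (li.filter p) hn hp
      (fun x hx => (hiff x).mpr (List.of_mem_filter hx))]
  exact canon_filter alpha p li (fun c hc => (hiff c).mp hc)

-- ===== VERDICT (by name: the statement is the Claim_ definition above) =====
theorem solution_spec : Claim_equal_solution := by
  intro s _
  unfold Spec_solution solution solution_alt
  simp only []
  rw [foldl_split s.toList [] []]
  simp only [List.nil_append]
  have hlow := sorted_filter_eq lowDesc isLow s.toList (by decide) (by decide) lowDesc_mem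
  have hup := sorted_filter_eq upDesc isUp s.toList (by decide) (by decide) upDesc_mem
  rw [hlow, hup]
  have halpha : descAlphabet = lowDesc ++ upDesc := by decide
  rw [halpha, List.flatMap_append]
  have hfun : (fun ch => List.replicate
        ((s.toList.foldl (fun d ch => d.modify ch 0 (fun x => x + 1))
          (PySem.Dict.empty : PySem.Dict Char Int)).getD ch 0).toNat ch)
      = (fun ch : Char => List.replicate (s.toList.count ch) ch) :=
    funext fun ch => by rw [counts_getD]
  rw [hfun]
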